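-- pv_equiv track=rewrite | github.com/MrBrantCode/unitest_baseline | mut_generate/mist_train_cf/cf_2097/solution.py | sum_of_integers
-- ===== SOURCE A (Python) =====
-- def sum_of_integers(arr):
--     # Check if the input argument is a valid array of integers
--     if not isinstance(arr, list):
--         raise Exception("Invalid input, argument must be an array.")
--     for num in arr:
--         if not isinstance(num, int) or isinstance(num, list):
--             raise Exception("Invalid input, array contains non-integer values or nested arrays.")
--
--     # Remove duplicates from the array
--     arr = list(set(arr))
--
--     # Calculate the sum of positive integers in the array
--     return sum([num for num in arr if num > 0])
-- ===== SOURCE B (Python) =====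
-- def sum_of_integers(arr):
--     # Check if the input argument is a valid array of integers
--     if not isinstance(arr, list):
--         raise Exception("Invalid input, argument must be an array.")
--     for num in arr:
--         if not isinstance(num, int) or isinstance(num, list):
--             raise Exception("Invalid input, array contains non-integer values or nested arrays.")
--
--     # Single pass: running total over first occurrences of positive values
--     total = 0
--     seen = set()
--     for num in arr:
--         if num > 0 and num not in seen:
--             seen.add(num)
--             total += num
--     return total
-- ===== Notes on version B (the rewrite author's own statement) =====
-- stated objective: alternative
-- what changed: Replaces the materialised list(set(arr)) plus a separate filtered comprehension-sum by one traversal that maintains a running total and an incrementally built seen set.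
import Mathlib
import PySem

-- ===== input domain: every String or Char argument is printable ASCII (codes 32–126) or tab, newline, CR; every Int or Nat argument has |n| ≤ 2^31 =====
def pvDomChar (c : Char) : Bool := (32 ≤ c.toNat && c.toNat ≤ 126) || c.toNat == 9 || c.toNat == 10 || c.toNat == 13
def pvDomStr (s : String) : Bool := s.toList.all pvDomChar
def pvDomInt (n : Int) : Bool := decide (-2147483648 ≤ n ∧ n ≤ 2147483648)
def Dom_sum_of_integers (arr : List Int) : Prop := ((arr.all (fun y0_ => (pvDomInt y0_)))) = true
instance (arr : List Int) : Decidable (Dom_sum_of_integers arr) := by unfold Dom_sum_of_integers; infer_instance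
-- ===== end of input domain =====

-- ===== PORT A =====
-- Port of A: the isinstance validation is vacuous for `List Int` (it never raises there),
-- so the port is list(set(arr)) then the filtered comprehension sum (sum is order-independent,
-- so consuming the Set's elements is exact).
def sum_of_integers (arr : List Int) : Int :=
  let arr2 : PySem.Set Int := PySem.Set.ofList arr
  (arr2.filter (fun num => decide (num > 0))).sum

-- ===== PORT B =====
-- Port of B: one fold over arr carrying (total, seen)
def sum_of_integers_alt (arr : List Int) : Int :=
  let r := arr.foldl
    (fun (st : Int × PySem.Set Int) num =>
      if num > 0 ∧ num ∉ st.2 then (st.1 + num, PySem.Set.add st.2 num) else st)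
    (0, PySem.Set.empty)
  r.1

-- ===== PRECONDITION & SPEC =====
def Spec_sum_of_integers (arr : List Int) (out : Int) : Prop := out = sum_of_integers_alt arr
instance (arr : List Int) (out : Int) : Decidable (Spec_sum_of_integers arr out) := by unfold Spec_sum_of_integers; infer_instance

-- ===== CLAIM (what is proved, stated in full; the proofs are below) =====
def Claim_equal_sum_of_integers : Prop := ∀ (arr : List Int), Dom_sum_of_integers arr → Spec_sum_of_integers arr (sum_of_integers arr)

-- ===== LEMMAS AND PROOFS =====

-- B's loop, as structural recursion on the remaining input with the seen set as parameter
def gsum : List Int → PySem.Set Int → Int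
  | [], _ => 0
  | x :: xs, s => if x > 0 ∧ x ∉ s then x + gsum xs (PySem.Set.add s x) else gsum xs s

lemma foldl_eq_gsum (arr : List Int) (t : Int) (s : PySem.Set Int) :
    (arr.foldl
      (fun (st : Int × PySem.Set Int) num =>
        if num > 0 ∧ num ∉ st.2 then (st.1 + num, PySem.Set.add st.2 num) else st)
      (t, s)).1 = t + gsum arr s := by
  induction arr generalizing t s with
  | nil => simp [gsum]
  | cons x xs ih =>
    simp only [List.foldl_cons, gsum]
    by_cases h : x > 0 ∧ x ∉ s
    · simp [h, ih]; ring
    · simp [h, ih]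

lemma gsum_eq_filter_sum (arr : List Int) (s : PySem.Set Int) :
    gsum arr s
      = ((PySem.Set.ofList arr).filter (fun x => decide (x > 0 ∧ x ∉ s))).sum := by
  induction arr generalizing s with
  | nil => simp [gsum, PySem.Set.ofList_nil]
  | cons x xs ih =>
    rw [PySem.Set.ofList_cons, PySem.Set.discard, List.filter_cons, List.filter_filter]
    simp only [gsum]
    by_cases h : x > 0 ∧ x ∉ s
    · rw [if_pos h, if_pos (by simpa using h), List.sum_cons, ih]
      congr 2
      apply List.filter_congr
      intro y _
      rw [Bool.eq_iff_iff]
      simp [PySem.Set.mem_add]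
      tauto
    · rw [if_neg h, if_neg (by simpa using h), ih]
      congr 1
      apply List.filter_congr
      intro y _
      by_cases hyx : y = x
      · subst hyx
        rw [Bool.eq_iff_iff]
        simp
        tauto
      · simp [hyx]

-- ===== VERDICT (by name: the statement is the Claim_ definition above) =====
theorem sum_of_integers_spec : Claim_equal_sum_of_integers := by
  intro arr _
  unfold Spec_sum_of_integers sum_of_integers sum_of_integers_alt
  rw [foldl_eq_gsum, gsum_eq_filter_sum]
  simp
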